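-- pv_equiv track=rewrite | github.com/DART-Research/NP-3DP | mesh_cutting.py | expand_dict_values
-- ===== SOURCE A (Python) =====
-- def expand_dict_values(d):
--     updated = True
--     while updated:  # Continue until no replacements are made
--         updated = False
--         for key, values in d.items():
--             new_values = []
--             for v in values:
--                 if v in d:  # If v is a key, replace it with its values
--                     new_values.extend(d[v])
--                     updated = True  # Mark that an update occurred
--                 else:
--                     new_values.append(v)  # Keep the value as is
--             d[key] = new_values  # Update the list for the current key
--     return d
-- ===== SOURCE B (Python) =====
-- def expand_dict_values(d):
--     # One explicit-stack depth-first expansion per key over the original dict,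
--     # instead of repeated whole-dict rewriting passes.
--     # Mutates d in place (like the original) and returns it.
--     result = {}
--     for k, vs in d.items():
--         out = []
--         stack = list(reversed(vs))
--         while stack:
--             x = stack.pop()
--             if x in d:
--                 stack.extend(reversed(d[x]))
--             else:
--                 out.append(x)
--         result[k] = out
--     d.update(result)
--     return d
-- ===== Notes on version B (the rewrite author's own statement) =====
-- stated objective: alternative
-- what changed: A repeatedly rewrites every value list of the whole dict until a pass makes no replacement (one pass per level of key nesting); B expands each value list once, by a single explicit-stack depth-first expansion over the original dict.
import Mathlib
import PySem

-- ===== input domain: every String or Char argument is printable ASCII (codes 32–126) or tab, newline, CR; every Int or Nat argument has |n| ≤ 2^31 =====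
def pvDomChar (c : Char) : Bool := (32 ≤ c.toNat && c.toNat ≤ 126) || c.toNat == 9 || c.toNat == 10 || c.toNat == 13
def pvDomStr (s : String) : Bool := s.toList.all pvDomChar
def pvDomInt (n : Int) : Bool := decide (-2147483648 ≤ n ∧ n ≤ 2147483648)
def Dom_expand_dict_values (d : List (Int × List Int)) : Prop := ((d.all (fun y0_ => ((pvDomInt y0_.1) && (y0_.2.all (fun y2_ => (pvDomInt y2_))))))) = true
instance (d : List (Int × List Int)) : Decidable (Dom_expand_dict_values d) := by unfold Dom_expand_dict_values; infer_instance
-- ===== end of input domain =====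

-- B replaces A's repeated whole-dict rewriting passes (iterated until a pass makes no
-- replacement) by a single explicit-stack depth-first expansion per key over the original
-- dict (objective: alternative algorithm); A mutates its argument in place and B performs
-- the same in-place update — the equivalence proved here is about the returned dict
-- contents.

-- ===== PORT A =====
-- Literal port of A's 'while updated' fixpoint loop. The inner 'for v in values' loop is
-- pvInnerA, one 'for key, values in d.items()' pass is pvPassA, the while-loop is pvLoopA.
-- On every input admitted by Pre_ the Python loop exits within d.length+2 passes (proved
-- below), so the fuel parameter is totality scaffolding only and never runs out there.
def pvInnerA (st : PySem.Dict Int (List Int)) (values : List Int) : List Int × Bool :=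
  values.foldl (fun acc v =>
    match st.get? v with
    | some vs => (acc.1 ++ vs, true)
    | none => (acc.1 ++ [v], acc.2)) (([] : List Int), false)

def pvPassA (ks : List Int) (st : PySem.Dict Int (List Int)) (upd : Bool) :
    PySem.Dict Int (List Int) × Bool :=
  match ks with
  | [] => (st, upd)
  | k :: ks =>
    let r := pvInnerA st (st.getD k [])
    pvPassA ks (st.insert k r.1) (upd || r.2)

def pvLoopA (fuel : Nat) (st : PySem.Dict Int (List Int)) : PySem.Dict Int (List Int) :=
  match fuel with
  | 0 => st
  | fuel + 1 =>
    let r := pvPassA st.keys st false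
    if r.2 then pvLoopA fuel r.1 else r.1

def expand_dict_values (d : List (Int × List Int)) : List (Int × List Int) :=
  (pvLoopA (d.length + 2) (PySem.Dict.mk d)).items

-- ===== PORT B =====
-- Literal port of B's explicit-stack loop. B keeps the top of its Python stack at the END
-- of the list; the port keeps the top at the HEAD, so 'stack = list(reversed(vs))' is the
-- stack vs, 'stack.pop()' takes the head, and 'stack.extend(reversed(d[x]))' prepends d[x]
-- (same elements popped in the same order). The while-loop runs for at most pvFuelB d
-- iterations on every input admitted by Pre_ (proved below); fuel is totality scaffolding
-- only and never runs out there.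
def pvFuelB (d : List (Int × List Int)) : Nat :=
  ((d.map (fun kv => kv.2.length)).sum + 2) ^ (d.length + 2)

def pvLoopB (st : PySem.Dict Int (List Int)) :
    Nat → List Int → List Int → List Int
  | _, [], out => out
  | 0, _, out => out
  | fuel + 1, x :: stack, out =>
    match st.get? x with
    | some vs => pvLoopB st fuel (vs ++ stack) out
    | none => pvLoopB st fuel stack (out ++ [x])

def expand_dict_values_alt (d : List (Int × List Int)) : List (Int × List Int) :=
  d.map (fun kv => (kv.1, pvLoopB (PySem.Dict.mk d) (pvFuelB d) kv.2 []))

-- ===== PRECONDITION & SPEC =====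
-- Closed-form key-reference reachability: pvSuccF d v = the keys occurring in d[v],
-- pvReachF d v = all keys reachable from v's list (d.length iterations saturate).
def pvKeysF (d : List (Int × List Int)) : Finset Int := (d.map Prod.fst).toFinset
def pvSuccF (d : List (Int × List Int)) (v : Int) : Finset Int :=
  ((PySem.Dict.mk d).getD v []).toFinset ∩ pvKeysF d
def pvStepF (d : List (Int × List Int)) (S : Finset Int) : Finset Int :=
  S ∪ S.biUnion (pvSuccF d)
def pvReachF (d : List (Int × List Int)) (v : Int) : Finset Int :=
  (pvStepF d)^[d.length] (pvSuccF d v)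

-- Pre_ excludes (a) association lists with duplicate keys, which do not denote a Python
-- dict (A's argument is a dict, whose keys are unique), and (b) inputs whose key-reference
-- graph has a cycle among the keys, on which A's while-loop never terminates (and B's
-- recursion never terminates either).
def Pre_expand_dict_values (d : List (Int × List Int)) : Prop :=
  (d.map Prod.fst).Nodup ∧ ∀ k ∈ d.map Prod.fst, k ∉ pvReachF d k
instance (d : List (Int × List Int)) : Decidable (Pre_expand_dict_values d) := by
  unfold Pre_expand_dict_values; infer_instance

def pvWitness_expand_dict_values : (List (Int × List Int)) := [(1, [2, 3]), (2, [3])]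

def Spec_expand_dict_values (d : List (Int × List Int)) (out : List (Int × List Int)) : Prop := out = expand_dict_values_alt d
instance (d : List (Int × List Int)) (out : List (Int × List Int)) : Decidable (Spec_expand_dict_values d out) := by unfold Spec_expand_dict_values; infer_instance

-- ===== CLAIM (what is proved, stated in full; the proofs are below) =====
def Claim_equal_expand_dict_values : Prop := ∀ (d : List (Int × List Int)), Dom_expand_dict_values d → Pre_expand_dict_values d → Spec_expand_dict_values d (expand_dict_values d)

-- ===== LEMMAS AND PROOFS =====

-- Proof-side abbreviations: a fuel-indexed recursive expansion and its stable version
-- (the normal form of one value), a fuel-indexed expansion-tree size, the reachability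
-- measure, and the "height" of a value.
def pvExpandB (st : PySem.Dict Int (List Int)) (fuel : Nat) (v : Int) : List Int :=
  match fuel with
  | 0 => [v]
  | fuel + 1 =>
    match st.get? v with
    | none => [v]
    | some vs => vs.flatMap (pvExpandB st fuel)

def pvSizeB (st : PySem.Dict Int (List Int)) (fuel : Nat) (v : Int) : Nat :=
  match fuel with
  | 0 => 1
  | fuel + 1 =>
    match st.get? v with
    | none => 1
    | some vs => 1 + (vs.map (pvSizeB st fuel)).sum

def pvNF (d : List (Int × List Int)) (v : Int) : List Int :=
  pvExpandB (PySem.Dict.mk d) (d.length + 1) v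

def pvSZ (d : List (Int × List Int)) (v : Int) : Nat :=
  pvSizeB (PySem.Dict.mk d) (d.length + 1) v
def pvM (d : List (Int × List Int)) (v : Int) : Nat := (pvReachF d v).card
def pvH (d : List (Int × List Int)) (v : Int) : Nat :=
  if v ∈ pvKeysF d then pvM d v + 1 else 0

-- Invariants of A's loop state: same keys positionwise with NF-equal value lists (pvINV),
-- values strictly lower than their key (pvJ), and a global height bound (pvHb).
def pvINV (d : List (Int × List Int)) (st : PySem.Dict Int (List Int)) : Prop :=
  List.Forall₂ (fun e e0 => e.1 = e0.1 ∧ e.2.flatMap (pvNF d) = e0.2.flatMap (pvNF d)) st.items d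
def pvJ (d : List (Int × List Int)) (st : PySem.Dict Int (List Int)) : Prop :=
  ∀ e ∈ st.items, ∀ v ∈ e.2, pvH d v < pvH d e.1
def pvHb (d : List (Int × List Int)) (c : Nat) (st : PySem.Dict Int (List Int)) : Prop :=
  ∀ e ∈ st.items, ∀ v ∈ e.2, pvH d v ≤ c

-- closure lemmas
theorem pvSucc_subset_keys (d : List (Int × List Int)) (v : Int) : pvSuccF d v ⊆ pvKeysF d :=
  Finset.inter_subset_right

theorem pvSubset_step (d : List (Int × List Int)) (S : Finset Int) : S ⊆ pvStepF d S :=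
  Finset.subset_union_left

theorem pvStep_mono (d : List (Int × List Int)) {S T : Finset Int} (h : S ⊆ T) :
    pvStepF d S ⊆ pvStepF d T := by
  intro x hx
  simp only [pvStepF, Finset.mem_union, Finset.mem_biUnion] at hx ⊢
  rcases hx with hx | ⟨a, ha, hx⟩
  · exact Or.inl (h hx)
  · exact Or.inr ⟨a, h ha, hx⟩

theorem pvStep_subset_keys (d : List (Int × List Int)) {S : Finset Int} (h : S ⊆ pvKeysF d) :
    pvStepF d S ⊆ pvKeysF d := by
  intro x hx
  simp only [pvStepF, Finset.mem_union, Finset.mem_biUnion] at hx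
  rcases hx with hx | ⟨a, _, hx⟩
  · exact h hx
  · exact pvSucc_subset_keys d a hx

theorem pvIter_fix (d : List (Int × List Int)) {X : Finset Int} (h : pvStepF d X = X) (n : Nat) :
    (pvStepF d)^[n] X = X := by
  induction n with
  | zero => rfl
  | succ n ih => rw [Function.iterate_succ_apply', ih, h]

theorem pvSubset_iterate (d : List (Int × List Int)) (S : Finset Int) (n : Nat) :
    S ⊆ (pvStepF d)^[n] S := by
  induction n with
  | zero => exact fun x hx => hx
  | succ n ih =>
    rw [Function.iterate_succ_apply']
    exact ih.trans (pvSubset_step d _)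

theorem pvIterate_subset_keys (d : List (Int × List Int)) {S : Finset Int} (h : S ⊆ pvKeysF d)
    (n : Nat) : (pvStepF d)^[n] S ⊆ pvKeysF d := by
  induction n with
  | zero => exact h
  | succ n ih =>
    rw [Function.iterate_succ_apply']
    exact pvStep_subset_keys d ih

theorem pvCard_growth (d : List (Int × List Int)) (S : Finset Int) :
    ∀ i : Nat, (∀ j, j < i → (pvStepF d)^[j + 1] S ≠ (pvStepF d)^[j] S) →
      S.card + i ≤ ((pvStepF d)^[i] S).card := by
  intro i
  induction i with
  | zero => intro _; simp
  | succ i ih =>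
    intro h
    have hsub : (pvStepF d)^[i] S ⊆ (pvStepF d)^[i + 1] S := by
      rw [Function.iterate_succ_apply']
      exact pvSubset_step d _
    have hne : (pvStepF d)^[i] S ≠ (pvStepF d)^[i + 1] S := fun heq => h i (by omega) heq.symm
    have hlt : ((pvStepF d)^[i] S).card < ((pvStepF d)^[i + 1] S).card :=
      Finset.card_lt_card (HasSubset.Subset.ssubset_of_ne hsub hne)
    have := ih (fun j hj => h j (by omega))
    omega

theorem pvReach_fix (d : List (Int × List Int)) (v : Int) :
    pvStepF d (pvReachF d v) = pvReachF d v := by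
  set S := pvSuccF d v with hS
  set n := d.length with hn
  by_cases hfix : ∃ j, j < n ∧ (pvStepF d)^[j + 1] S = (pvStepF d)^[j] S
  · obtain ⟨j, hj, heq⟩ := hfix
    have hX : pvStepF d ((pvStepF d)^[j] S) = (pvStepF d)^[j] S := by
      rw [Function.iterate_succ_apply'] at heq; exact heq
    have h1 : pvReachF d v = (pvStepF d)^[j] S := by
      show (pvStepF d)^[n] S = _
      have hnj : n = (n - j) + j := by omega
      rw [hnj, Function.iterate_add_apply, pvIter_fix d hX]
    rw [h1]; exact hX
  · push Not at hfix
    by_cases hn1 : (pvStepF d)^[n + 1] S = (pvStepF d)^[n] S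
    · show pvStepF d ((pvStepF d)^[n] S) = (pvStepF d)^[n] S
      rw [Function.iterate_succ_apply'] at hn1; exact hn1
    · exfalso
      have hgrow := pvCard_growth d S (n + 1) (by
        intro j hj
        rcases Nat.lt_or_ge j n with hjn | hjn
        · exact hfix j hjn
        · have : j = n := by omega
          subst this; exact hn1)
      have hsubk : (pvStepF d)^[n + 1] S ⊆ pvKeysF d :=
        pvIterate_subset_keys d (pvSucc_subset_keys d v) (n + 1)
      have hck : ((pvStepF d)^[n + 1] S).card ≤ (pvKeysF d).card := Finset.card_le_card hsubk
      have hkl : (pvKeysF d).card ≤ n := by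
        have := List.toFinset_card_le (d.map Prod.fst)
        simpa [pvKeysF, hn] using this
      omega

theorem pvReach_subset_keys (d : List (Int × List Int)) (v : Int) :
    pvReachF d v ⊆ pvKeysF d :=
  pvIterate_subset_keys d (pvSucc_subset_keys d v) d.length

theorem pvSucc_subset_reach (d : List (Int × List Int)) (v : Int) :
    pvSuccF d v ⊆ pvReachF d v :=
  pvSubset_iterate d (pvSuccF d v) d.length

theorem pvIterate_subset_of_fix (d : List (Int × List Int)) {X R : Finset Int} (hXR : X ⊆ R)
    (hR : pvStepF d R = R) (n : Nat) : (pvStepF d)^[n] X ⊆ R := by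
  induction n with
  | zero => exact hXR
  | succ n ih =>
    rw [Function.iterate_succ_apply']
    exact hR ▸ pvStep_mono d ih

theorem pvReach_trans (d : List (Int × List Int)) {v w : Int} (h : w ∈ pvReachF d v) :
    pvReachF d w ⊆ pvReachF d v := by
  have hsucc : pvSuccF d w ⊆ pvReachF d v := by
    intro x hx
    have : x ∈ pvStepF d (pvReachF d v) := by
      simp only [pvStepF, Finset.mem_union, Finset.mem_biUnion]
      exact Or.inr ⟨w, h, hx⟩
    rwa [pvReach_fix d v] at this
  exact pvIterate_subset_of_fix d hsucc (pvReach_fix d v) d.length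

theorem pvM_le (d : List (Int × List Int)) (v : Int) : pvM d v ≤ d.length := by
  have h1 : (pvReachF d v).card ≤ (pvKeysF d).card :=
    Finset.card_le_card (pvReach_subset_keys d v)
  have h2 : (pvKeysF d).card ≤ d.length := by
    have := List.toFinset_card_le (d.map Prod.fst)
    simpa [pvKeysF] using this
  exact le_trans h1 h2

theorem pvM_lt (d : List (Int × List Int)) (hpre : Pre_expand_dict_values d) {v w : Int}
    (hw : w ∈ pvSuccF d v) (hwk : w ∈ pvKeysF d) : pvM d w < pvM d v := by
  have hww : w ∉ pvReachF d w := hpre.2 w (List.mem_toFinset.mp hwk)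
  have hwv : w ∈ pvReachF d v := pvSucc_subset_reach d v hw
  have hsub : pvReachF d w ⊆ pvReachF d v := pvReach_trans d hwv
  exact Finset.card_lt_card (HasSubset.Subset.ssubset_of_ne hsub
    (fun heq => hww (heq ▸ hwv)))

-- NF lemmas
theorem pvGet?_mk_none (d : List (Int × List Int)) (v : Int) (h : v ∉ pvKeysF d) :
    (PySem.Dict.mk d).get? v = none := by
  rw [PySem.Dict.get?_eq_none_iff_not_mem_keys]
  intro hv
  exact h (by simpa [pvKeysF, PySem.Dict.keys_mk] using hv)

theorem pvExpand_nonkey (d : List (Int × List Int)) (v : Int) (h : v ∉ pvKeysF d) (f : Nat) :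
    pvExpandB (PySem.Dict.mk d) f v = [v] := by
  cases f with
  | zero => rfl
  | succ f => simp [pvExpandB, pvGet?_mk_none d v h]

theorem pvM_lt_of_mem (d : List (Int × List Int)) (hpre : Pre_expand_dict_values d)
    {v w : Int} {vs : List Int} (hget : (PySem.Dict.mk d).get? v = some vs) (hw : w ∈ vs)
    (hwk : w ∈ pvKeysF d) : pvM d w < pvM d v := by
  have hgd : (PySem.Dict.mk d).getD v [] = vs := PySem.Dict.getD_of_get?_eq_some _ _ hget
  have hsucc : w ∈ pvSuccF d v := by
    simp only [pvSuccF, hgd, Finset.mem_inter, List.mem_toFinset]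
    exact ⟨hw, hwk⟩
  exact pvM_lt d hpre hsucc hwk

theorem pvExpand_stab (d : List (Int × List Int)) (hpre : Pre_expand_dict_values d) :
    ∀ (f1 : Nat) (v : Int) (f2 : Nat), pvM d v < f1 → pvM d v < f2 →
      pvExpandB (PySem.Dict.mk d) f1 v = pvExpandB (PySem.Dict.mk d) f2 v := by
  intro f1
  induction f1 with
  | zero => intro v f2 h1 _; omega
  | succ a ih =>
    intro v f2 h1 h2
    cases f2 with
    | zero => omega
    | succ b =>
      cases hg : (PySem.Dict.mk d).get? v with
      | none => simp [pvExpandB, hg]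
      | some vs =>
        simp only [pvExpandB, hg]
        refine List.flatMap_congr ?_
        intro w hwv
        by_cases hk : w ∈ pvKeysF d
        · have hmw : pvM d w < pvM d v := pvM_lt_of_mem d hpre hg hwv hk
          exact ih w b (by omega) (by omega)
        · rw [pvExpand_nonkey d w hk, pvExpand_nonkey d w hk]

theorem pvNF_eq (d : List (Int × List Int)) (hpre : Pre_expand_dict_values d) {v : Int}
    {f : Nat} (h : pvM d v < f) : pvExpandB (PySem.Dict.mk d) f v = pvNF d v := by
  unfold pvNF
  exact pvExpand_stab d hpre f v (d.length + 1) h (by have := pvM_le d v; omega)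

theorem pvNF_nonkey (d : List (Int × List Int)) {v : Int} (h : v ∉ pvKeysF d) :
    pvNF d v = [v] := pvExpand_nonkey d v h _

theorem pvNF_key (d : List (Int × List Int)) (hpre : Pre_expand_dict_values d) {v : Int}
    {vs : List Int} (hget : (PySem.Dict.mk d).get? v = some vs) :
    pvNF d v = vs.flatMap (pvNF d) := by
  show pvExpandB (PySem.Dict.mk d) (d.length + 1) v = _
  simp only [pvExpandB, hget]
  refine List.flatMap_congr ?_
  intro w hwv
  by_cases hk : w ∈ pvKeysF d
  · have hm : pvM d w < pvM d v := pvM_lt_of_mem d hpre hget hwv hk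
    exact pvNF_eq d hpre (lt_of_lt_of_le hm (pvM_le d v))
  · rw [pvExpand_nonkey d w hk, pvNF_nonkey d hk]

theorem pvNF_fixed (d : List (Int × List Int)) {vs : List Int}
    (h : ∀ x ∈ vs, x ∉ pvKeysF d) : vs.flatMap (pvNF d) = vs := by
  rw [List.flatMap_congr (fun x hx => pvNF_nonkey d (h x hx))]
  exact List.flatMap_singleton' vs

-- size lemmas (termination budget for B's stack loop)
theorem pvSize_stab (d : List (Int × List Int)) (hpre : Pre_expand_dict_values d) :
    ∀ (f1 : Nat) (v : Int) (f2 : Nat), pvM d v < f1 → pvM d v < f2 →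
      pvSizeB (PySem.Dict.mk d) f1 v = pvSizeB (PySem.Dict.mk d) f2 v := by
  intro f1
  induction f1 with
  | zero => intro v f2 h1 _; omega
  | succ a ih =>
    intro v f2 h1 h2
    cases f2 with
    | zero => omega
    | succ b =>
      cases hg : (PySem.Dict.mk d).get? v with
      | none => simp [pvSizeB, hg]
      | some vs =>
        simp only [pvSizeB, hg]
        congr 1
        congr 1
        refine List.map_congr_left ?_
        intro w hwv
        by_cases hk : w ∈ pvKeysF d
        · have hmw : pvM d w < pvM d v := pvM_lt_of_mem d hpre hg hwv hk
          exact ih w b (by omega) (by omega)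
        · have hgw : (PySem.Dict.mk d).get? w = none := pvGet?_mk_none d w hk
          cases a <;> cases b <;> simp [pvSizeB, hgw]

theorem pvSZ_eq (d : List (Int × List Int)) (hpre : Pre_expand_dict_values d) {v : Int}
    {f : Nat} (h : pvM d v < f) : pvSizeB (PySem.Dict.mk d) f v = pvSZ d v := by
  unfold pvSZ
  exact pvSize_stab d hpre f v (d.length + 1) h (by have := pvM_le d v; omega)

theorem pvSZ_nonkey (d : List (Int × List Int)) {v : Int}
    (hg : (PySem.Dict.mk d).get? v = none) : pvSZ d v = 1 := by
  show pvSizeB (PySem.Dict.mk d) (d.length + 1) v = 1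
  simp [pvSizeB, hg]

theorem pvSZ_key (d : List (Int × List Int)) (hpre : Pre_expand_dict_values d) {v : Int}
    {vs : List Int} (hg : (PySem.Dict.mk d).get? v = some vs) :
    pvSZ d v = 1 + (vs.map (pvSZ d)).sum := by
  show pvSizeB (PySem.Dict.mk d) (d.length + 1) v = _
  simp only [pvSizeB, hg]
  congr 1
  congr 1
  refine List.map_congr_left ?_
  intro w hwv
  by_cases hk : w ∈ pvKeysF d
  · have hm : pvM d w < pvM d v := pvM_lt_of_mem d hpre hg hwv hk
    exact pvSZ_eq d hpre (lt_of_lt_of_le hm (pvM_le d v))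
  · have hgw : (PySem.Dict.mk d).get? w = none := pvGet?_mk_none d w hk
    cases hd : d.length <;> simp [pvSizeB, hgw, pvSZ_nonkey d hgw]

theorem pvSZ_pos (d : List (Int × List Int)) (v : Int) : 1 ≤ pvSZ d v := by
  show 1 ≤ pvSizeB (PySem.Dict.mk d) (d.length + 1) v
  cases hg : (PySem.Dict.mk d).get? v <;> simp [pvSizeB, hg]

theorem pvNotKey_of_get?_none (d : List (Int × List Int)) {v : Int}
    (hg : (PySem.Dict.mk d).get? v = none) : v ∉ pvKeysF d := by
  rw [PySem.Dict.get?_eq_none_iff_not_mem_keys] at hg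
  intro hvk
  exact hg (by simpa [PySem.Dict.keys_mk, pvKeysF] using hvk)

theorem pvLen_le_sum (d : List (Int × List Int)) {v : Int} {vs : List Int}
    (hg : (PySem.Dict.mk d).get? v = some vs) :
    vs.length ≤ (d.map (fun kv => kv.2.length)).sum := by
  have hmem : (v, vs) ∈ d := PySem.Dict.mem_items_of_get?_eq_some (PySem.Dict.mk d) hg
  exact List.le_sum_of_mem (List.mem_map.mpr ⟨(v, vs), hmem, rfl⟩)

theorem pvSZ_bound (d : List (Int × List Int)) (hpre : Pre_expand_dict_values d) :
    ∀ (n : Nat) (v : Int), pvM d v < n →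
      pvSZ d v ≤ ((d.map (fun kv => kv.2.length)).sum + 2) ^ (pvM d v + 1) := by
  intro n
  induction n with
  | zero => intro v h; omega
  | succ n ih =>
    intro v hv
    cases hg : (PySem.Dict.mk d).get? v with
    | none =>
      rw [pvSZ_nonkey d hg]
      exact Nat.one_le_pow _ _ (by omega)
    | some vs =>
      rw [pvSZ_key d hpre hg]
      have hbnd : ∀ x ∈ vs.map (pvSZ d),
          x ≤ ((d.map (fun kv => kv.2.length)).sum + 2) ^ (pvM d v) := by
        intro x hx
        obtain ⟨w, hw, rfl⟩ := List.mem_map.mp hx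
        by_cases hk : w ∈ pvKeysF d
        · have hmw : pvM d w < pvM d v := pvM_lt_of_mem d hpre hg hw hk
          calc pvSZ d w ≤ ((d.map (fun kv => kv.2.length)).sum + 2) ^ (pvM d w + 1) :=
                ih w (by omega)
            _ ≤ ((d.map (fun kv => kv.2.length)).sum + 2) ^ (pvM d v) :=
                Nat.pow_le_pow_right (by omega) (by omega)
        · rw [pvSZ_nonkey d (pvGet?_mk_none d w hk)]
          exact Nat.one_le_pow _ _ (by omega)
      have hsum : (vs.map (pvSZ d)).sum ≤
          vs.length * ((d.map (fun kv => kv.2.length)).sum + 2) ^ (pvM d v) := by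
        have := List.sum_le_card_nsmul (vs.map (pvSZ d)) _ hbnd
        simpa [smul_eq_mul] using this
      have hlen : vs.length ≤ (d.map (fun kv => kv.2.length)).sum := pvLen_le_sum d hg
      have hpow1 : 1 ≤ ((d.map (fun kv => kv.2.length)).sum + 2) ^ (pvM d v) :=
        Nat.one_le_pow _ _ (by omega)
      calc 1 + (vs.map (pvSZ d)).sum
          ≤ 1 + (d.map (fun kv => kv.2.length)).sum *
              ((d.map (fun kv => kv.2.length)).sum + 2) ^ (pvM d v) := by
            have := Nat.mul_le_mul_right
              (((d.map (fun kv => kv.2.length)).sum + 2) ^ (pvM d v)) hlen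
            omega
        _ ≤ ((d.map (fun kv => kv.2.length)).sum + 2) ^ (pvM d v + 1) := by
            rw [pow_succ]
            have h2 : ((d.map (fun kv => kv.2.length)).sum + 2) ^ (pvM d v) *
                ((d.map (fun kv => kv.2.length)).sum + 2) =
                ((d.map (fun kv => kv.2.length)).sum + 2) ^ (pvM d v) *
                  (d.map (fun kv => kv.2.length)).sum +
                ((d.map (fun kv => kv.2.length)).sum + 2) ^ (pvM d v) * 2 := by ring
            rw [h2]
            have := Nat.mul_comm
              (((d.map (fun kv => kv.2.length)).sum + 2) ^ (pvM d v))
              ((d.map (fun kv => kv.2.length)).sum)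
            omega

-- the stack loop of B computes out ++ (normal forms of the stack, in order)
theorem pvLoopB_spec (d : List (Int × List Int)) (hpre : Pre_expand_dict_values d) :
    ∀ (fuel : Nat) (stack out : List Int), (stack.map (pvSZ d)).sum ≤ fuel →
      pvLoopB (PySem.Dict.mk d) fuel stack out = out ++ stack.flatMap (pvNF d) := by
  intro fuel
  induction fuel with
  | zero =>
    intro stack out hs
    cases stack with
    | nil => simp [pvLoopB]
    | cons x s =>
      exfalso
      have h1 := pvSZ_pos d x
      simp only [List.map_cons, List.sum_cons] at hs
      omega
  | succ f ih =>
    intro stack out hs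
    cases stack with
    | nil => simp [pvLoopB]
    | cons x s =>
      simp only [List.map_cons, List.sum_cons] at hs
      cases hg : (PySem.Dict.mk d).get? x with
      | some vs =>
        have hkey : pvSZ d x = 1 + (vs.map (pvSZ d)).sum := pvSZ_key d hpre hg
        have hstep : pvLoopB (PySem.Dict.mk d) (f + 1) (x :: s) out =
            pvLoopB (PySem.Dict.mk d) f (vs ++ s) out := by
          simp [pvLoopB, hg]
        rw [hstep, ih (vs ++ s) out (by simp only [List.map_append, List.sum_append]; omega)]
        rw [List.flatMap_cons, List.flatMap_append, pvNF_key d hpre hg]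
      | none =>
        have hstep : pvLoopB (PySem.Dict.mk d) (f + 1) (x :: s) out =
            pvLoopB (PySem.Dict.mk d) f s (out ++ [x]) := by
          simp [pvLoopB, hg]
        rw [hstep, ih s (out ++ [x]) (by have h1 := pvSZ_pos d x; omega)]
        rw [List.flatMap_cons, pvNF_nonkey d (pvNotKey_of_get?_none d hg)]
        simp

-- the fuel of B's port covers one whole value list
theorem pvFuelB_enough (d : List (Int × List Int)) (hpre : Pre_expand_dict_values d)
    {kv : Int × List Int} (hkv : kv ∈ d) :
    (kv.2.map (pvSZ d)).sum ≤ pvFuelB d := by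
  have hbnd : ∀ x ∈ kv.2.map (pvSZ d),
      x ≤ ((d.map (fun kv => kv.2.length)).sum + 2) ^ (d.length + 1) := by
    intro x hx
    obtain ⟨w, _, rfl⟩ := List.mem_map.mp hx
    calc pvSZ d w ≤ ((d.map (fun kv => kv.2.length)).sum + 2) ^ (pvM d w + 1) :=
          pvSZ_bound d hpre (pvM d w + 1) w (by omega)
      _ ≤ ((d.map (fun kv => kv.2.length)).sum + 2) ^ (d.length + 1) :=
          Nat.pow_le_pow_right (by omega) (by have := pvM_le d w; omega)
  have hsum : (kv.2.map (pvSZ d)).sum ≤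
      kv.2.length * ((d.map (fun kv => kv.2.length)).sum + 2) ^ (d.length + 1) := by
    have := List.sum_le_card_nsmul (kv.2.map (pvSZ d)) _ hbnd
    simpa [smul_eq_mul] using this
  have hlen : kv.2.length ≤ (d.map (fun kv => kv.2.length)).sum :=
    List.le_sum_of_mem (List.mem_map.mpr ⟨kv, hkv, rfl⟩)
  have hpow1 : 1 ≤ ((d.map (fun kv => kv.2.length)).sum + 2) ^ (d.length + 1) :=
    Nat.one_le_pow _ _ (by omega)
  have hmul := Nat.mul_le_mul_right
    (((d.map (fun kv => kv.2.length)).sum + 2) ^ (d.length + 1)) hlen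
  calc (kv.2.map (pvSZ d)).sum
      ≤ (d.map (fun kv => kv.2.length)).sum *
          ((d.map (fun kv => kv.2.length)).sum + 2) ^ (d.length + 1) := le_trans hsum hmul
    _ ≤ pvFuelB d := by
        show _ ≤ ((d.map (fun kv => kv.2.length)).sum + 2) ^ (d.length + 2)
        rw [show d.length + 2 = (d.length + 1) + 1 from rfl, pow_succ]
        calc (d.map (fun kv => kv.2.length)).sum *
              ((d.map (fun kv => kv.2.length)).sum + 2) ^ (d.length + 1)
            ≤ ((d.map (fun kv => kv.2.length)).sum + 2) *
              ((d.map (fun kv => kv.2.length)).sum + 2) ^ (d.length + 1) :=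
              Nat.mul_le_mul_right _ (by omega)
          _ = ((d.map (fun kv => kv.2.length)).sum + 2) ^ (d.length + 1) *
              ((d.map (fun kv => kv.2.length)).sum + 2) := Nat.mul_comm _ _

-- inner loop characterization
theorem pvInnerA_spec (st : PySem.Dict Int (List Int)) (values : List Int) :
    pvInnerA st values =
      (values.flatMap (fun v => match st.get? v with | some vs => vs | none => [v]),
       values.any (fun v => (st.get? v).isSome)) := by
  suffices h : ∀ (values : List Int) (acc : List Int) (b : Bool),
      values.foldl (fun acc v => match st.get? v with
        | some vs => (acc.1 ++ vs, true)
        | none => (acc.1 ++ [v], acc.2)) (acc, b) =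
      (acc ++ values.flatMap (fun v => match st.get? v with | some vs => vs | none => [v]),
       b || values.any (fun v => (st.get? v).isSome)) by
    simpa [pvInnerA] using h values [] false
  intro values
  induction values with
  | nil => intro acc b; simp
  | cons v vs ih =>
    intro acc b
    cases hg : st.get? v with
    | some l => simp [hg, ih, List.append_assoc]
    | none => simp [hg, ih, List.append_assoc]

-- INV consequences
theorem pvForall₂_mem_left {α β : Type} {R : α → β → Prop} :
    ∀ {l1 : List α} {l2 : List β}, List.Forall₂ R l1 l2 → ∀ a ∈ l1, ∃ b ∈ l2, R a b := by
  intro l1 l2 h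
  induction h with
  | nil => intro a ha; cases ha
  | cons hab _ ih =>
    intro a ha
    rcases List.mem_cons.mp ha with rfl | ha
    · exact ⟨_, List.mem_cons_self, hab⟩
    · obtain ⟨b, hb, hr⟩ := ih a ha
      exact ⟨b, List.mem_cons_of_mem _ hb, hr⟩

theorem pvForall₂_fst_eq {α β : Type} {R : (α × β) → (α × β) → Prop}
    (hR : ∀ a b, R a b → a.1 = b.1) :
    ∀ {l1 l2 : List (α × β)}, List.Forall₂ R l1 l2 →
      l1.map Prod.fst = l2.map Prod.fst := by
  intro l1 l2 h
  induction h with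
  | nil => rfl
  | cons hab _ ih => simp only [List.map_cons, ih, hR _ _ hab]

theorem pvForall₂_imp_mem {α β : Type} {R S : α → β → Prop} :
    ∀ {l1 : List α} {l2 : List β}, List.Forall₂ R l1 l2 →
      (∀ a ∈ l1, ∀ b ∈ l2, R a b → S a b) → List.Forall₂ S l1 l2 := by
  intro l1 l2 h
  induction h with
  | nil => intro _; exact List.Forall₂.nil
  | cons hab htail ih =>
    intro himp
    exact List.Forall₂.cons
      (himp _ List.mem_cons_self _ List.mem_cons_self hab)
      (ih (fun a ha b hb hr => himp a (List.mem_cons_of_mem _ ha) b (List.mem_cons_of_mem _ hb) hr))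

theorem pvINV_keys (d : List (Int × List Int)) {st : PySem.Dict Int (List Int)}
    (h : pvINV d st) : st.items.map Prod.fst = d.map Prod.fst :=
  pvForall₂_fst_eq (fun _ _ hr => hr.1) h

theorem pvKeys_nodup (d : List (Int × List Int)) (hpre : Pre_expand_dict_values d)
    {st : PySem.Dict Int (List Int)} (hinv : pvINV d st) : st.keys.Nodup := by
  show (st.items.map Prod.fst).Nodup
  rw [pvINV_keys d hinv]
  exact hpre.1

theorem pvINV_get? (d : List (Int × List Int)) (hpre : Pre_expand_dict_values d)
    {st : PySem.Dict Int (List Int)} (hinv : pvINV d st) {v : Int} {vs : List Int}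
    (hget : st.get? v = some vs) : vs.flatMap (pvNF d) = pvNF d v := by
  have hmem : (v, vs) ∈ st.items := PySem.Dict.mem_items_of_get?_eq_some st hget
  obtain ⟨e0, he0, hfst, hflat⟩ :
      ∃ e0 ∈ d, v = e0.1 ∧ vs.flatMap (pvNF d) = e0.2.flatMap (pvNF d) := by
    obtain ⟨e0, he0, hr⟩ := pvForall₂_mem_left hinv (v, vs) hmem
    exact ⟨e0, he0, hr.1, hr.2⟩
  have hg0 : (PySem.Dict.mk d).get? v = some e0.2 := by
    rw [PySem.Dict.get?_eq_some_iff_mem_items _ _ _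
      (by simpa [PySem.Dict.keys_mk] using hpre.1)]
    show (v, e0.2) ∈ d
    rw [hfst]
    exact he0
  rw [hflat, ← pvNF_key d hpre hg0]

theorem pvInsert_self (st : PySem.Dict Int (List Int)) (k : Int) (v : List Int)
    (hnd : st.keys.Nodup) (hget : st.get? k = some v) : st.insert k v = st := by
  apply PySem.Dict.ext
  rw [PySem.Dict.items_insert_of_contains st v
    (by rw [PySem.Dict.contains_eq_isSome_get?, hget]; rfl)]
  have hcongr : ∀ p ∈ st.items, (if (p.1 == k) = true then (k, v) else p) = p := by
    intro p hp
    by_cases hpk : p.1 = k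
    · have hsome : st.get? k = some p.2 := by
        rw [PySem.Dict.get?_eq_some_iff_mem_items _ _ _ hnd]
        show (k, p.2) ∈ st.items
        rw [← hpk]
        exact hp
      have hv : v = p.2 := by rw [hget] at hsome; exact Option.some.inj hsome
      have hbeq : (p.1 == k) = true := beq_iff_eq.mpr hpk
      rw [if_pos hbeq, hv, ← hpk]
    · simp [hpk]
  rw [List.map_congr_left hcongr]
  simp

-- pass lemmas
theorem pvPassA_flag_true : ∀ (ks : List Int) (st : PySem.Dict Int (List Int)),
    (pvPassA ks st true).2 = true := by
  intro ks
  induction ks with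
  | nil => intro st; rfl
  | cons k ks ih =>
    intro st
    simp only [pvPassA, Bool.true_or]
    exact ih _

theorem pvPassA_false : ∀ (ks : List Int) (st : PySem.Dict Int (List Int)),
    st.keys.Nodup → (∀ k ∈ ks, k ∈ st.keys) → (pvPassA ks st false).2 = false →
    (pvPassA ks st false).1 = st ∧ ∀ k ∈ ks, ∀ v ∈ st.getD k [], st.get? v = none := by
  intro ks
  induction ks with
  | nil => intro st _ _ _; exact ⟨rfl, by intro k hk; cases hk⟩
  | cons k ks ih =>
    intro st hnd hks hflag
    have hkmem : k ∈ st.keys := hks k List.mem_cons_self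
    obtain ⟨vs, hg⟩ : ∃ vs, st.get? k = some vs := by
      cases hgk : st.get? k with
      | some vs => exact ⟨vs, rfl⟩
      | none =>
        rw [PySem.Dict.get?_eq_none_iff_not_mem_keys] at hgk
        exact absurd hkmem hgk
    have hgd : st.getD k [] = vs := PySem.Dict.getD_of_get?_eq_some _ _ hg
    cases hany : vs.any (fun v => (st.get? v).isSome) with
    | true =>
      exfalso
      have hr1 : (pvInnerA st (st.getD k [])).2 = true := by
        rw [pvInnerA_spec, hgd]; exact hany
      have : (pvPassA (k :: ks) st false).2 = true := by
        simp only [pvPassA, hr1, Bool.false_or]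
        exact pvPassA_flag_true ks _
      rw [this] at hflag; cases hflag
    | false =>
      have hnone' : ∀ v ∈ vs, st.get? v = none := by
        intro v hv
        have hns := (List.any_eq_false.mp hany) v hv
        cases hgv : st.get? v with
        | none => rfl
        | some l => rw [hgv] at hns; simp at hns
      have hr1 : (pvInnerA st (st.getD k [])).2 = false := by
        rw [pvInnerA_spec, hgd]; exact hany
      have hr0 : (pvInnerA st (st.getD k [])).1 = vs := by
        rw [pvInnerA_spec, hgd]
        show vs.flatMap (fun v => match st.get? v with | some l => l | none => [v]) = vs
        have hfm : ∀ v ∈ vs,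
            (fun v => match st.get? v with | some l => l | none => [v]) v
              = (fun v => [v]) v := by
          intro v hv; simp [hnone' v hv]
        rw [List.flatMap_congr hfm]
        exact List.flatMap_singleton' vs
      have hstep : pvPassA (k :: ks) st false = pvPassA ks st false := by
        simp only [pvPassA, hr0, hr1, Bool.false_or]
        rw [pvInsert_self st k vs hnd hg]
      rw [hstep] at hflag
      obtain ⟨h1, h2⟩ := ih st hnd (fun k' h => hks k' (List.mem_cons_of_mem _ h)) hflag
      refine ⟨by rw [hstep]; exact h1, ?_⟩
      intro k' hk'
      rcases List.mem_cons.mp hk' with rfl | hk'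
      · intro v hv; exact hnone' v (hgd ▸ hv)
      · exact h2 k' hk' 

theorem pvPassA_id_of_nonkey : ∀ (ks : List Int) (st : PySem.Dict Int (List Int)) (upd : Bool),
    st.keys.Nodup → (∀ k ∈ ks, k ∈ st.keys) →
    (∀ k ∈ ks, ∀ v ∈ st.getD k [], st.get? v = none) → pvPassA ks st upd = (st, upd) := by
  intro ks
  induction ks with
  | nil => intro st upd _ _ _; rfl
  | cons k ks ih =>
    intro st upd hnd hks hnone
    have hkmem : k ∈ st.keys := hks k List.mem_cons_self
    obtain ⟨vs, hg⟩ : ∃ vs, st.get? k = some vs := by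
      cases hgk : st.get? k with
      | some vs => exact ⟨vs, rfl⟩
      | none =>
        rw [PySem.Dict.get?_eq_none_iff_not_mem_keys] at hgk
        exact absurd hkmem hgk
    have hgd : st.getD k [] = vs := PySem.Dict.getD_of_get?_eq_some _ _ hg
    have hnone' : ∀ v ∈ vs, st.get? v = none := by
      intro v hv; exact hnone k List.mem_cons_self v (hgd ▸ hv)
    have hr1 : (pvInnerA st (st.getD k [])).2 = false := by
      rw [pvInnerA_spec, hgd]
      show vs.any _ = false
      rw [List.any_eq_false]
      intro v hv
      simp [hnone' v hv]
    have hr0 : (pvInnerA st (st.getD k [])).1 = vs := by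
      rw [pvInnerA_spec, hgd]
      show vs.flatMap (fun v => match st.get? v with | some l => l | none => [v]) = vs
      have hfm : ∀ v ∈ vs,
          (fun v => match st.get? v with | some l => l | none => [v]) v
            = (fun v => [v]) v := by
        intro v hv; simp [hnone' v hv]
      rw [List.flatMap_congr hfm]
      exact List.flatMap_singleton' vs
    have hstep : pvPassA (k :: ks) st upd = pvPassA ks st upd := by
      simp only [pvPassA, hr0, hr1, Bool.or_false]
      rw [pvInsert_self st k vs hnd hg]
    rw [hstep]
    exact ih st upd hnd (fun k' h => hks k' (List.mem_cons_of_mem _ h))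
      (fun k' h => hnone k' (List.mem_cons_of_mem _ h))

theorem pvPassA_main (d : List (Int × List Int)) (hpre : Pre_expand_dict_values d) (c : Nat)
    (hc : 1 ≤ c) : ∀ (ks : List Int) (st : PySem.Dict Int (List Int)) (upd : Bool),
    (∀ k ∈ ks, k ∈ d.map Prod.fst) → pvINV d st → pvJ d st → pvHb d c st →
    (∀ e ∈ st.items, e.1 ∉ ks → ∀ v ∈ e.2, pvH d v ≤ c - 1) →
    pvINV d (pvPassA ks st upd).1 ∧ pvJ d (pvPassA ks st upd).1 ∧
      pvHb d (c - 1) (pvPassA ks st upd).1 := by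
  intro ks
  induction ks with
  | nil =>
    intro st upd _ hinv hJ _ hdone
    exact ⟨hinv, hJ, fun e he v hv => hdone e he (fun h => (List.not_mem_nil h)) v hv⟩
  | cons k ks ih =>
    intro st upd hks hinv hJ hHb hdone
    have hnd : st.keys.Nodup := pvKeys_nodup d hpre hinv
    have hkeys : st.items.map Prod.fst = d.map Prod.fst := pvINV_keys d hinv
    have hkmem : k ∈ st.keys := by
      show k ∈ st.items.map Prod.fst
      rw [hkeys]
      exact hks k List.mem_cons_self
    obtain ⟨vs, hg⟩ : ∃ vs, st.get? k = some vs := by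
      cases hgk : st.get? k with
      | some vs => exact ⟨vs, rfl⟩
      | none =>
        rw [PySem.Dict.get?_eq_none_iff_not_mem_keys] at hgk
        exact absurd hkmem hgk
    have hgd : st.getD k [] = vs := PySem.Dict.getD_of_get?_eq_some _ _ hg
    have hkv : (k, vs) ∈ st.items := PySem.Dict.mem_items_of_get?_eq_some st hg
    have hr0 : (pvInnerA st (st.getD k [])).1 =
        vs.flatMap (fun v => match st.get? v with | some l => l | none => [v]) := by
      rw [pvInnerA_spec, hgd]
    -- the rebuilt list preserves normal forms
    have hflat : (vs.flatMap (fun v => match st.get? v with | some l => l | none => [v])).flatMap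
        (pvNF d) = vs.flatMap (pvNF d) := by
      rw [List.flatMap_assoc]
      refine List.flatMap_congr ?_
      intro v _
      cases hgv : st.get? v with
      | some l =>
        simpa [hgv] using pvINV_get? d hpre hinv hgv
      | none => simp
    -- every element of the rebuilt list sits strictly below k and below c
    have hbound : ∀ w ∈ vs.flatMap (fun v => match st.get? v with | some l => l | none => [v]),
        pvH d w < pvH d k ∧ pvH d w ≤ c - 1 := by
      intro w hw
      obtain ⟨v, hv, hwg⟩ := List.mem_flatMap.mp hw
      have hvk : pvH d v < pvH d k := hJ (k, vs) hkv v hv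
      have hvc : pvH d v ≤ c := hHb (k, vs) hkv v hv
      cases hgv : st.get? v with
      | some l =>
        have hwl : w ∈ l := by simpa [hgv] using hwg
        have hvl : (v, l) ∈ st.items := PySem.Dict.mem_items_of_get?_eq_some st hgv
        have h1 : pvH d w < pvH d v := hJ (v, l) hvl w hwl
        exact ⟨lt_trans h1 hvk, by omega⟩
      | none =>
        have hwv : w = v := by simpa [hgv] using hwg
        subst hwv
        have hnk : w ∉ pvKeysF d := by
          rw [PySem.Dict.get?_eq_none_iff_not_mem_keys] at hgv
          intro hmem
          apply hgv
          show w ∈ st.items.map Prod.fst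
          rw [hkeys]
          exact List.mem_toFinset.mp hmem
        have h0 : pvH d w = 0 := by simp [pvH, hnk]
        exact ⟨hvk, by omega⟩
    have hcont : st.contains k = true := by
      rw [PySem.Dict.contains_eq_isSome_get?, hg]; rfl
    have hitems' : (st.insert k (vs.flatMap (fun v => match st.get? v with
        | some l => l | none => [v]))).items = st.items.map (fun p =>
        if (p.1 == k) = true then (k, vs.flatMap (fun v => match st.get? v with
          | some l => l | none => [v])) else p) :=
      PySem.Dict.items_insert_of_contains st _ hcont
    have hmem' : ∀ e' ∈ (st.insert k (vs.flatMap (fun v => match st.get? v with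
        | some l => l | none => [v]))).items,
        e' = (k, vs.flatMap (fun v => match st.get? v with | some l => l | none => [v])) ∨
          (e' ∈ st.items ∧ e'.1 ≠ k) := by
      intro e' he'
      rw [hitems'] at he'
      obtain ⟨p, hp, hpe⟩ := List.mem_map.mp he'
      by_cases hpk : (p.1 == k) = true
      · left; rw [← hpe, if_pos hpk]
      · right
        rw [if_neg hpk] at hpe
        subst hpe
        exact ⟨hp, fun h => hpk (beq_iff_eq.mpr h)⟩
    have hinv' : pvINV d (st.insert k (vs.flatMap (fun v => match st.get? v with
        | some l => l | none => [v]))) := by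
      show List.Forall₂ _ _ d
      rw [hitems', List.forall₂_map_left_iff]
      refine pvForall₂_imp_mem hinv ?_
      intro p hp e0 _ hF
      by_cases hpk : (p.1 == k) = true
      · have hpk' : p.1 = k := beq_iff_eq.mp hpk
        have hp2 : p.2 = vs := by
          have hsome : st.get? k = some p.2 := by
            rw [PySem.Dict.get?_eq_some_iff_mem_items _ _ _ hnd]
            show (k, p.2) ∈ st.items
            rw [← hpk']
            exact (Prod.mk.eta).symm ▸ hp
          rw [hg] at hsome
          exact (Option.some.inj hsome).symm
        rw [if_pos hpk]
        refine ⟨by rw [← hpk']; exact hF.1, ?_⟩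
        show (vs.flatMap _).flatMap (pvNF d) = _
        rw [hflat, ← hp2]
        exact hF.2
      · rw [if_neg hpk]
        exact hF
    have hJ' : pvJ d (st.insert k (vs.flatMap (fun v => match st.get? v with
        | some l => l | none => [v]))) := by
      intro e' he' v hv
      rcases hmem' e' he' with rfl | ⟨he, _⟩
      · exact (hbound v hv).1
      · exact hJ e' he v hv
    have hHb' : pvHb d c (st.insert k (vs.flatMap (fun v => match st.get? v with
        | some l => l | none => [v]))) := by
      intro e' he' v hv
      rcases hmem' e' he' with rfl | ⟨he, _⟩
      · exact le_trans (hbound v hv).2 (by omega)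
      · exact hHb e' he v hv
    have hdone' : ∀ e ∈ (st.insert k (vs.flatMap (fun v => match st.get? v with
        | some l => l | none => [v]))).items, e.1 ∉ ks → ∀ v ∈ e.2, pvH d v ≤ c - 1 := by
      intro e' he' hnks v hv
      rcases hmem' e' he' with rfl | ⟨he, hne⟩
      · exact (hbound v hv).2
      · refine hdone e' he ?_ v hv
        intro hmem
        rcases List.mem_cons.mp hmem with h | h
        · exact hne h
        · exact hnks h
    have hstep : pvPassA (k :: ks) st upd = pvPassA ks (st.insert k (vs.flatMap
        (fun v => match st.get? v with | some l => l | none => [v])))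
        (upd || (pvInnerA st (st.getD k [])).2) := by
      simp only [pvPassA, hr0]
    rw [hstep]
    exact ih _ _ (fun k' h => hks k' (List.mem_cons_of_mem _ h)) hinv' hJ' hHb' hdone' 

theorem pvItems_eq_target_aux (d : List (Int × List Int)) :
    ∀ (l dl : List (Int × List Int)),
      List.Forall₂ (fun e e0 => e.1 = e0.1 ∧
        e.2.flatMap (pvNF d) = e0.2.flatMap (pvNF d)) l dl →
      (∀ e ∈ l, ∀ v ∈ e.2, v ∉ pvKeysF d) →
      l = dl.map (fun kv => (kv.1, kv.2.flatMap (pvNF d))) := by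
  intro l dl h
  induction h with
  | nil => intro _; rfl
  | @cons a b l1 l2 hab _ ih =>
    intro hfree
    simp only [List.map_cons]
    have ha : a = (b.1, b.2.flatMap (pvNF d)) := by
      have h2 : a.2 = b.2.flatMap (pvNF d) :=
        (pvNF_fixed d (hfree a List.mem_cons_self)).symm.trans hab.2
      rw [← hab.1, ← h2]
    rw [← ha, ih (fun e he v hv => hfree e (List.mem_cons_of_mem _ he) v hv)]

theorem pvItems_eq_target (d : List (Int × List Int))
    {st : PySem.Dict Int (List Int)} (hinv : pvINV d st)
    (hfree : ∀ e ∈ st.items, ∀ v ∈ e.2, v ∉ pvKeysF d) :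
    st.items = d.map (fun kv => (kv.1, kv.2.flatMap (pvNF d))) :=
  pvItems_eq_target_aux d st.items d hinv hfree

theorem pvLoopA_main (d : List (Int × List Int)) (hpre : Pre_expand_dict_values d) :
    ∀ (fuel c : Nat) (st : PySem.Dict Int (List Int)), pvINV d st → pvJ d st → pvHb d c st →
    c < fuel → (pvLoopA fuel st).items = d.map (fun kv => (kv.1, kv.2.flatMap (pvNF d))) := by
  intro fuel
  induction fuel with
  | zero => intro c st _ _ _ hcf; omega
  | succ f ihf =>
    intro c st hinv hJ hHb hcf
    have hnd : st.keys.Nodup := pvKeys_nodup d hpre hinv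
    have hkeys : st.items.map Prod.fst = d.map Prod.fst := pvINV_keys d hinv
    cases hflag : (pvPassA st.keys st false).2 with
    | false =>
      obtain ⟨hid, hnone⟩ := pvPassA_false st.keys st hnd (fun _ h => h) hflag
      have hloop : pvLoopA (f + 1) st = st := by
        simp only [pvLoopA, hflag, Bool.false_eq_true, if_false]
        exact hid
      rw [hloop]
      refine pvItems_eq_target d hinv ?_
      intro e he v hv
      have he1 : e.1 ∈ st.keys := by
        show e.1 ∈ st.items.map Prod.fst
        exact List.mem_map.mpr ⟨e, he, rfl⟩
      have hgde : st.getD e.1 [] = e.2 :=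
        PySem.Dict.getD_of_mem_items st (Prod.mk.eta.symm ▸ he) hnd []
      have hnv := hnone e.1 he1 v (hgde ▸ hv)
      rw [PySem.Dict.get?_eq_none_iff_not_mem_keys] at hnv
      intro hvk
      apply hnv
      show v ∈ st.items.map Prod.fst
      rw [hkeys]
      exact List.mem_toFinset.mp hvk
    | true =>
      have hc1 : 1 ≤ c := by
        by_contra hc0
        have hc0' : c = 0 := by omega
        subst hc0'
        have hnone : ∀ k ∈ st.keys, ∀ v ∈ st.getD k [], st.get? v = none := by
          intro k hk v hv
          obtain ⟨e, he, hek⟩ := List.mem_map.mp (show k ∈ st.items.map Prod.fst from hk)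
          have hgde : st.getD k [] = e.2 := by
            rw [← hek]
            exact PySem.Dict.getD_of_mem_items st (Prod.mk.eta.symm ▸ he) hnd []
          have hv' : v ∈ e.2 := hgde ▸ hv
          have h0 : pvH d v = 0 := Nat.le_zero.mp (hHb e he v hv')
          have hnk : v ∉ pvKeysF d := by
            intro hvk
            rw [pvH, if_pos hvk] at h0
            omega
          rw [PySem.Dict.get?_eq_none_iff_not_mem_keys]
          intro hvs
          apply hnk
          have : v ∈ st.items.map Prod.fst := hvs
          rw [hkeys] at this
          exact List.mem_toFinset.mpr this
        have hpid := pvPassA_id_of_nonkey st.keys st false hnd (fun _ h => h) hnone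
        rw [hpid] at hflag
        cases hflag
      obtain ⟨hinv', hJ', hHb'⟩ := pvPassA_main d hpre c hc1 st.keys st false
        (by
          intro k hk
          have : k ∈ st.items.map Prod.fst := hk
          rw [hkeys] at this
          exact this)
        hinv hJ hHb
        (by
          intro e he hnot v hv
          exact absurd (show e.1 ∈ st.keys from List.mem_map.mpr ⟨e, he, rfl⟩) hnot)
      have hloop : pvLoopA (f + 1) st = pvLoopA f (pvPassA st.keys st false).1 := by
        simp only [pvLoopA, hflag, if_true]
      rw [hloop]
      exact ihf (c - 1) _ hinv' hJ' hHb' (by omega)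

-- initial state facts
theorem pvINV_init (d : List (Int × List Int)) : pvINV d (PySem.Dict.mk d) := by
  show List.Forall₂ _ d d
  exact List.forall₂_same.mpr (fun e _ => ⟨rfl, rfl⟩)

theorem pvJ_init (d : List (Int × List Int)) (hpre : Pre_expand_dict_values d) :
    pvJ d (PySem.Dict.mk d) := by
  intro e he v hv
  have hek : e.1 ∈ pvKeysF d :=
    List.mem_toFinset.mpr (List.mem_map.mpr ⟨e, he, rfl⟩)
  have hg : (PySem.Dict.mk d).get? e.1 = some e.2 := by
    rw [PySem.Dict.get?_eq_some_iff_mem_items _ _ _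
      (by simpa [PySem.Dict.keys_mk] using hpre.1)]
    show (e.1, e.2) ∈ d
    exact Prod.mk.eta.symm ▸ he
  by_cases hvk : v ∈ pvKeysF d
  · have hm := pvM_lt_of_mem d hpre hg hv hvk
    simp only [pvH, if_pos hvk, if_pos hek]
    omega
  · simp only [pvH, if_neg hvk, if_pos hek]
    omega

theorem pvHb_init (d : List (Int × List Int)) : pvHb d (d.length + 1) (PySem.Dict.mk d) := by
  intro e _ v _
  unfold pvH
  split
  · have := pvM_le d v; omega
  · omega

-- ===== VERDICT (by name: the statement is the Claim_ definition above) =====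
theorem expand_dict_values_spec : Claim_equal_expand_dict_values := by
  intro d _hdom hpre
  show expand_dict_values d = expand_dict_values_alt d
  unfold expand_dict_values
  rw [pvLoopA_main d hpre (d.length + 2) (d.length + 1) (PySem.Dict.mk d) (pvINV_init d)
    (pvJ_init d hpre) (pvHb_init d) (by omega)]
  show _ = d.map (fun kv => (kv.1, pvLoopB (PySem.Dict.mk d) (pvFuelB d) kv.2 []))
  refine List.map_congr_left ?_
  intro kv hkv
  rw [pvLoopB_spec d hpre (pvFuelB d) kv.2 [] (pvFuelB_enough d hpre hkv)]
  simp
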